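-- pv_equiv track=rewrite | github.com/zairving/Advent-of-Code | 2025/day_2/part_2.py | check_digits_repeated
-- ===== SOURCE A (Python) =====
-- def check_digits_repeated(digits: str, id: str) -> bool:
--     """
--     Check if `digits` are repeated in `id`.
--
--     Parameters
--     ----------
--     digits : str
--         The digits.
--     id : str
--         The ID.
--
--     Returns
--     -------
--     bool
--         `False` if digits repeat, `True` otherwise.
--     """
--
--     valid = False
--
--     l = len(digits)
--     L = len(id)
--
--     for i in range(l, L, l):
--         if id[i:i + l] != digits:
--             valid = True
--
--     return valid
-- ===== SOURCE B (Python) =====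
-- def check_digits_repeated(digits: str, id: str) -> bool:
--     l = len(digits)
--     tail = id[l:]
--     return not (len(tail) % l == 0 and tail == digits * (len(tail) // l))
-- ===== Notes on version B (the rewrite author's own statement) =====
-- stated objective: simpler
-- what changed: B replaces A's flag-setting loop over index blocks by a closed-form check: the part of id after the first block tiles perfectly with digits iff its length is a multiple of len(digits) and it equals digits repeated that many times.
-- outside the precondition, e.g. on check_digits_repeated('', 'abc'): A raises ValueError, B raises ZeroDivisionError
import Mathlib
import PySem

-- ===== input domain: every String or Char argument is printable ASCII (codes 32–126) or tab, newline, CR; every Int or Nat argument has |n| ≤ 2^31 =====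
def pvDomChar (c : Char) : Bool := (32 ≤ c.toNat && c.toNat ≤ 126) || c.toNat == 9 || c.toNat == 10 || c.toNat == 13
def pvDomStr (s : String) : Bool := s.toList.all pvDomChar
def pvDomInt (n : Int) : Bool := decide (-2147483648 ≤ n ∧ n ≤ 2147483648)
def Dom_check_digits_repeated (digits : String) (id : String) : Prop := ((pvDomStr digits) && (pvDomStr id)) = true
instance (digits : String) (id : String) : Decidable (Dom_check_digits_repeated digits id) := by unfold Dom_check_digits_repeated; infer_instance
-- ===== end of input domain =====

-- B replaces A's flag-setting block loop by a closed-form tiling test (same cost, simpler);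
-- Pre_ excludes digits = "", where Python A raises ValueError (range step 0) and B raises ZeroDivisionError.


-- ===== PORT A =====
def check_digits_repeated (digits : String) (id : String) : Bool :=
  let valid := false
  let l := PySem.Str.len digits
  let L := PySem.Str.len id
  (PySem.List.pyRange l L l).foldl
    (fun valid i =>
      if PySem.Str.slice id (some i) (some (i + l)) ≠ digits then true else valid)
    valid

-- ===== PORT B =====
def check_digits_repeated_alt (digits : String) (id : String) : Bool :=
  let l := PySem.Str.len digits
  let tail := PySem.Str.slice id (some l) none
  -- `digits * (len(tail) // l)` ported by hand as flattened replication (exact for a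
  -- nonnegative repetition count, which len(tail) // l is whenever l > 0, i.e. on Pre_)
  !(decide (PySem.Int.mod (PySem.Str.len tail) l = 0) &&
    decide (tail = String.ofList
      (List.flatten (List.replicate (PySem.Int.floordiv (PySem.Str.len tail) l).toNat digits.toList))))

-- ===== PRECONDITION & SPEC =====
-- Pre_ excludes digits = "": there Python A raises ValueError (range() arg 3 must not be zero)
-- and Python B raises ZeroDivisionError, so neither returns a value.
def Pre_check_digits_repeated (digits : String) (id : String) : Prop := digits ≠ ""
instance (digits : String) (id : String) : Decidable (Pre_check_digits_repeated digits id) := by unfold Pre_check_digits_repeated; infer_instance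
def pvWitness_check_digits_repeated : String × String := ("12", "121213")
def Spec_check_digits_repeated (digits : String) (id : String) (out : Bool) : Prop := out = check_digits_repeated_alt digits id
instance (digits : String) (id : String) (out : Bool) : Decidable (Spec_check_digits_repeated digits id out) := by unfold Spec_check_digits_repeated; infer_instance

-- ===== CLAIM (what is proved, stated in full; the proofs are below) =====
def Claim_equal_check_digits_repeated : Prop := ∀ (digits : String) (id : String), Dom_check_digits_repeated digits id → Pre_check_digits_repeated digits id → Spec_check_digits_repeated digits id (check_digits_repeated digits id)

-- ===== LEMMAS AND PROOFS =====

-- A's loop: a foldl that only ever sets the flag is `any`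
theorem foldl_flag {α : Type} (P : α → Prop) [DecidablePred P] :
    ∀ (xs : List α) (b : Bool),
      xs.foldl (fun v i => if P i then true else v) b = (b || xs.any (fun i => decide (P i))) := by
  intro xs
  induction xs with
  | nil => simp
  | cons x xs ih =>
      intro b
      rw [List.foldl_cons, ih]
      by_cases h : P x <;> simp [h]

-- the core tiling characterisation, on lists
theorem tiles_iff (dl : List Char) (hl : 0 < dl.length) :
    ∀ t : List Char,
      (∀ k < (t.length + dl.length - 1) / dl.length,
          List.take dl.length (List.drop (dl.length * k) t) = dl)
      ↔ (t.length % dl.length = 0 ∧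
         t = (List.replicate (t.length / dl.length) dl).flatten) := by
  intro t
  generalize hm : t.length = m
  induction m using Nat.strong_induction_on generalizing t with
  | _ m ih =>
  subst hm
  set l := dl.length with hldef
  rcases Nat.eq_zero_or_pos t.length with hm0 | hmpos
  · -- t = []
    have ht : t = [] := List.length_eq_zero_iff.mp hm0
    subst ht
    have hcnt : (l - 1) / l = 0 := Nat.div_eq_of_lt (by omega)
    simp only [List.length_nil, Nat.zero_add, hcnt]
    simp
  · by_cases hml : t.length < l
    · -- short nonempty tail: both sides false
      have hcnt : (t.length + l - 1) / l = 1 := Nat.div_eq_of_lt_le (by omega) (by omega)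
      constructor
      · intro h
        have h0 := h 0 (by rw [hcnt]; omega)
        rw [Nat.mul_zero, List.drop_zero, List.take_of_length_le (by omega)] at h0
        exfalso
        have : t.length = l := by rw [h0]
        omega
      · rintro ⟨hmod, -⟩
        rw [Nat.mod_eq_of_lt hml] at hmod
        omega
    · -- l ≤ t.length : peel one block
      have hlm : l ≤ t.length := le_of_not_gt hml
      have ht' : (List.drop l t).length = t.length - l := by simp
      have hcnt : (t.length + l - 1) / l = ((t.length - l) + l - 1) / l + 1 := by
        have e : t.length + l - 1 = ((t.length - l) + l - 1) + l := by omega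
        rw [e, Nat.add_div_right _ hl]
      have hih := ih (t.length - l) (by omega) (List.drop l t) ht'
      have happ : ∀ r : List Char, (t = dl ++ r ↔ List.take l t = dl ∧ List.drop l t = r) := by
        intro r
        constructor
        · rintro rfl
          exact ⟨List.take_left' rfl, List.drop_left' rfl⟩
        · rintro ⟨h1, h2⟩
          rw [← List.take_append_drop l t, h1, h2]
      have hshift : ∀ k, List.take l (List.drop (l * k) (List.drop l t))
          = List.take l (List.drop (l * (k + 1)) t) := by
        intro k
        rw [List.drop_drop]
        have e : l + l * k = l * (k + 1) := by ring
        rw [e]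
      have hmod : t.length % l = (t.length - l) % l := Nat.mod_eq_sub_mod hlm
      have hdiv : t.length / l = (t.length - l) / l + 1 := Nat.div_eq_sub_div hl hlm
      constructor
      · intro h
        have h0 := h 0 (by rw [hcnt]; exact Nat.succ_pos _)
        rw [Nat.mul_zero, List.drop_zero] at h0
        have htail := hih.mp (fun k hk => by
          rw [hshift k]
          exact h (k + 1) (by rw [hcnt]; exact Nat.succ_lt_succ hk))
        rw [hmod, hdiv]
        refine ⟨htail.1, ?_⟩
        rw [List.replicate_succ, List.flatten_cons]
        exact (happ _).mpr ⟨h0, htail.2⟩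
      · rintro ⟨hmod0, heq⟩
        rw [hdiv, List.replicate_succ, List.flatten_cons] at heq
        obtain ⟨h1, h2⟩ := (happ _).mp heq
        have h' := hih.mpr ⟨by rw [← hmod]; exact hmod0, h2⟩
        intro k hk
        cases k with
        | zero => rw [Nat.mul_zero, List.drop_zero]; exact h1
        | succ j =>
            rw [← hshift j]
            exact h' j (by rw [hcnt] at hk; exact Nat.lt_of_succ_lt_succ hk)

theorem main (digits id : String) (hpre : digits ≠ "") :
    check_digits_repeated digits id = check_digits_repeated_alt digits id := by
  have hdl : digits.toList ≠ [] := by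
    intro h
    exact hpre (String.toList_inj.mp (by simp [h]))
  have hl : 0 < digits.toList.length := List.length_pos_iff.mpr hdl
  set dl := digits.toList with hdldef
  set l := dl.length with hldef
  set cs := id.toList with hcsdef
  set tl := List.drop l cs with htldef
  have hlen : tl.length = cs.length - l := by simp [htldef]
  -- A side
  have hA : check_digits_repeated digits id
      = ((List.range ((tl.length + l - 1) / l)).any
          (fun k => decide (¬ List.take l (List.drop (l * k) tl) = dl))) := by
    unfold check_digits_repeated
    rw [foldl_flag (fun i => PySem.Str.slice id (some i) (some (i + PySem.Str.len digits)) ≠ digits)]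
    rw [Bool.false_or]
    rw [PySem.List.pyRange_of_pos _ _ (by rw [PySem.Str.len_eq]; exact_mod_cast hl)]
    rw [List.any_map]
    have hcnt : (if PySem.Str.len digits < PySem.Str.len id then
        ((PySem.Str.len id - PySem.Str.len digits + PySem.Str.len digits - 1) / PySem.Str.len digits).toNat else 0)
        = (tl.length + l - 1) / l := by
      rw [PySem.Str.len_eq, PySem.Str.len_eq, hlen]
      split_ifs with h
      · have hL : l < cs.length := by exact_mod_cast h
        have e1 : ((cs.length:ℤ) - l + l - 1) = ((cs.length - 1 : ℕ) : ℤ) := by push_cast; omega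
        rw [e1, ← Int.natCast_div, Int.toNat_natCast]
        congr 1
        omega
      · have hL : cs.length ≤ l := by exact_mod_cast not_lt.mp h
        have e : cs.length - l + l - 1 = l - 1 := by omega
        rw [e, Nat.div_eq_of_lt (by omega)]
    rw [hcnt]
    have hfun : ((fun i => decide (PySem.Str.slice id (some i) (some (i + PySem.Str.len digits)) ≠ digits))
          ∘ (fun k : ℕ => PySem.Str.len digits + PySem.Str.len digits * (k:ℤ)))
        = fun k : ℕ => decide (¬ List.take l (List.drop (l * k) tl) = dl) := by
      funext k
      simp only [Function.comp_apply]
      rw [decide_eq_decide]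
      have hidx : PySem.Str.len digits + PySem.Str.len digits * (k:ℤ) = ((l + l * k : ℕ) : ℤ) := by
        rw [PySem.Str.len_eq]; push_cast; ring
      rw [hidx]
      have hslice : (PySem.Str.slice id (some ((l + l * k : ℕ) : ℤ))
            (some (((l + l * k : ℕ) : ℤ) + PySem.Str.len digits))).toList
          = List.take l (List.drop (l * k) tl) := by
        rw [PySem.Str.len_eq]
        have : ((l:ℤ)) = ((l:ℕ):ℤ) := rfl
        simp only [PySem.Str.slice, PySem.Chars.slice]
        rw [String.toList_ofList]
        have e2 : ((l + l * k : ℕ) : ℤ) + ((dl.length : ℕ) : ℤ) = ((l + l * k : ℕ) : ℤ) + ((l : ℕ) : ℤ) := by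
          rw [← hldef]
        rw [e2, PySem.List.slice_natCast_add]
        rw [htldef, List.drop_drop]
      constructor
      · intro hne hEq
        exact hne (by rw [← String.toList_inj, hslice, hEq])
      · intro hne hEq
        exact hne (by rw [← hslice, hEq])
    rw [hfun]
  -- B side
  have hB : check_digits_repeated_alt digits id
      = !(decide (tl.length % l = 0) && decide (tl = (List.replicate (tl.length / l) dl).flatten)) := by
    unfold check_digits_repeated_alt
    show (!(decide (PySem.Int.mod (PySem.Str.len (PySem.Str.slice id (some (PySem.Str.len digits)) none)) (PySem.Str.len digits) = 0) &&
      decide ((PySem.Str.slice id (some (PySem.Str.len digits)) none) = String.ofList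
        (List.flatten (List.replicate (PySem.Int.floordiv (PySem.Str.len (PySem.Str.slice id (some (PySem.Str.len digits)) none)) (PySem.Str.len digits)).toNat digits.toList))))) = _
    rw [PySem.Str.len_eq digits]
    have htail : (PySem.Str.slice id (some ((digits.toList.length : ℤ))) none).toList = tl := by
      simp only [PySem.Str.slice, PySem.Chars.slice]
      rw [String.toList_ofList, PySem.List.slice_from_natCast]
    have htlen : PySem.Str.len (PySem.Str.slice id (some ((digits.toList.length : ℤ))) none) = (tl.length : ℤ) := by
      rw [PySem.Str.len_eq, htail]
    rw [htlen, PySem.Int.mod_natCast, PySem.Int.floordiv_natCast, Int.toNat_natCast]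
    have e1 : (decide ((↑(tl.length % digits.toList.length) : ℤ) = 0))
        = decide (tl.length % l = 0) := by
      rw [decide_eq_decide]
      exact Nat.cast_eq_zero
    have e2 : (decide (PySem.Str.slice id (some ((digits.toList.length : ℤ))) none
          = String.ofList (List.replicate (tl.length / digits.toList.length) digits.toList).flatten))
        = decide (tl = (List.replicate (tl.length / l) dl).flatten) := by
      rw [decide_eq_decide, ← String.toList_inj, htail, String.toList_ofList]
    rw [e1, e2]
  -- combine
  rw [hA, hB]
  rw [Bool.eq_iff_iff]
  simp only [List.any_eq_true, List.mem_range, decide_eq_true_eq, Bool.not_eq_eq_eq_not,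
    Bool.not_true, Bool.and_eq_false_iff, ← Bool.not_eq_true]
  rw [← not_iff_not]
  push_neg
  simp only [Bool.not_not, Bool.and_eq_true, decide_eq_true_eq]
  exact tiles_iff dl hl tl

-- ===== VERDICT (by name: the statement is the Claim_ definition above) =====
theorem check_digits_repeated_spec : Claim_equal_check_digits_repeated := by
  intro digits id _ hpre
  unfold Spec_check_digits_repeated
  exact main digits id hpre
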